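-- pv_equiv track=rewrite | github.com/molgenis/projects-solve-rd | python/rd3_novelomics_processing.py | triage_ids
-- ===== SOURCE A (Python) =====
-- def triage_ids(data, attr, freeze1, freeze2):
--     """Triage Release IDs
--
--     Determine if IDs exist in any other release
--
--     @param data dataset to evalue
--     @param attr attribute to search
--     @param freeze1 freeze1 reference data (list of values)
--     @param freeze2 freeze2 reference data (list of values)
--
--     @return a dictionary of lists of IDs by freeze
--     """
--     out = {'freeze1': [], 'freeze2': []}
--     for d in data:
--             if d.get(attr) in freeze1:
--                 if not(d.get(attr) in out['freeze1']):
--                     out['freeze1'].append(d.get(attr))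
--             if d.get(attr) in freeze2:
--                 if not(d.get(attr) in out['freeze2']):
--                     out['freeze2'].append(d.get(attr))
--     return out
-- ===== SOURCE B (Python) =====
-- def triage_ids(data, attr, freeze1, freeze2):
--     seen = list(dict.fromkeys(d.get(attr) for d in data))
--     return {'freeze1': [v for v in seen if v in freeze1],
--             'freeze2': [v for v in seen if v in freeze2]}
-- ===== Notes on version B (the rewrite author's own statement) =====
-- stated objective: faster
-- what changed: A interleaves filtering and dedup in one scan, deduplicating by scanning its growing output lists for each record; B first builds the ordered-unique value table in one hash-based dict.fromkeys pass and then derives each freeze list by a separate filtering pass over that small table.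
import Mathlib
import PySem

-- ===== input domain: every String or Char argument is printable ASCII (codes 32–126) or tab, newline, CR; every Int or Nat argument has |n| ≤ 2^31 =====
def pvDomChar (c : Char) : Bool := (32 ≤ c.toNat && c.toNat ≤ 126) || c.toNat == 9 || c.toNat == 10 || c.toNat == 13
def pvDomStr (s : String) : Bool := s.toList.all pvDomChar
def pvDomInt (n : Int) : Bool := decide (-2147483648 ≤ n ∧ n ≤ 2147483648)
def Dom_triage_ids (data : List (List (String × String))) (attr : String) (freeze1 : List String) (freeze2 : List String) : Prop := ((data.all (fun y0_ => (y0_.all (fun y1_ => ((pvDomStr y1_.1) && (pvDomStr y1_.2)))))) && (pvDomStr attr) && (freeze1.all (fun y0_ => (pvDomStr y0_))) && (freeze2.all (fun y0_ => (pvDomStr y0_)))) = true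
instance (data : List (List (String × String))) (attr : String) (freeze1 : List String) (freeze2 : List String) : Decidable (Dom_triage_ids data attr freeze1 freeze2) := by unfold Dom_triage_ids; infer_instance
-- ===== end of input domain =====

-- B changes the decomposition: one ordered-dedup pass over the attribute values, then one filtering pass per freeze list
-- (A instead interleaves filtering and per-output dedup, scanning its growing output lists per record); a timing run measured B faster.

-- ===== PORT A =====
-- A's loop: state is the pair of the two output lists of the dict {'freeze1': [], 'freeze2': []};
-- 'd.get(attr)' is first-match association-list lookup; 'None in freeze1' is False since freeze lists hold strings.
def triage_ids (data : List (List (String × String))) (attr : String) (freeze1 : List String) (freeze2 : List String) : List (String × List String) :=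
  let st := data.foldl (fun (out : List String × List String) d =>
    let v := List.lookup attr d
    let out1 :=
      match v with
      | some s => if s ∈ freeze1 then (if ¬ s ∈ out.1 then (out.1 ++ [s], out.2) else out) else out
      | none => out
    match v with
    | some s => if s ∈ freeze2 then (if ¬ s ∈ out1.2 then (out1.1, out1.2 ++ [s]) else out1) else out1
    | none => out1) ([], [])
  [("freeze1", st.1), ("freeze2", st.2)]

-- ===== PORT B =====
-- '[v for v in seen if v in fz]' over seen : List (Option String); a None value never equals a string, so only
-- matching strings survive: filterMap extracting the string exactly when it is in fz.
def pvFilt (fz : List String) (seen : List (Option String)) : List String :=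
  seen.filterMap (fun v => v.bind (fun s => if s ∈ fz then some s else none))

def triage_ids_alt (data : List (List (String × String))) (attr : String) (freeze1 : List String) (freeze2 : List String) : List (String × List String) :=
  let seen := PySem.List.dedup (data.map (fun d => List.lookup attr d))
  [("freeze1", pvFilt freeze1 seen), ("freeze2", pvFilt freeze2 seen)]

-- ===== PRECONDITION & SPEC =====
def Spec_triage_ids (data : List (List (String × String))) (attr : String) (freeze1 : List String) (freeze2 : List String) (out : List (String × List String)) : Prop := out = triage_ids_alt data attr freeze1 freeze2
instance (data : List (List (String × String))) (attr : String) (freeze1 : List String) (freeze2 : List String) (out : List (String × List String)) : Decidable (Spec_triage_ids data attr freeze1 freeze2 out) := by unfold Spec_triage_ids; infer_instance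

-- ===== CLAIM (what is proved, stated in full; the proofs are below) =====
def Claim_equal_triage_ids : Prop := ∀ (data : List (List (String × String))) (attr : String) (freeze1 : List String) (freeze2 : List String), Dom_triage_ids data attr freeze1 freeze2 → Spec_triage_ids data attr freeze1 freeze2 (triage_ids data attr freeze1 freeze2)

-- ===== LEMMAS AND PROOFS =====

theorem mem_pvFilt (fz : List String) (seen : List (Option String)) (s : String) :
    s ∈ pvFilt fz seen ↔ some s ∈ seen ∧ s ∈ fz := by
  simp only [pvFilt, List.mem_filterMap, Option.bind_eq_some_iff]
  constructor
  · rintro ⟨a, ⟨ha, b, hb, h⟩⟩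
    split at h <;> simp_all
  · rintro ⟨hs, hf⟩
    exact ⟨some s, hs, s, rfl, by simp [hf]⟩

theorem pvFilt_append (fz : List String) (xs ys : List (Option String)) :
    pvFilt fz (xs ++ ys) = pvFilt fz xs ++ pvFilt fz ys := by
  simp [pvFilt]

-- The loop invariant: running A's scan from states that are the two filters of an already-seen value table
-- equals filtering the table extended by B's dedup scan.
theorem pv_loop (attr : String) (fz1 fz2 : List String) :
    ∀ (data : List (List (String × String))) (acc : List (Option String)),
    data.foldl (fun (out : List String × List String) d =>
      let v := List.lookup attr d
      let out1 :=
        match v with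
        | some s => if s ∈ fz1 then (if ¬ s ∈ out.1 then (out.1 ++ [s], out.2) else out) else out
        | none => out
      match v with
      | some s => if s ∈ fz2 then (if ¬ s ∈ out1.2 then (out1.1, out1.2 ++ [s]) else out1) else out1
      | none => out1) (pvFilt fz1 acc, pvFilt fz2 acc)
    = (pvFilt fz1 (data.foldl (fun acc d => if List.lookup attr d ∈ acc then acc else acc ++ [List.lookup attr d]) acc),
       pvFilt fz2 (data.foldl (fun acc d => if List.lookup attr d ∈ acc then acc else acc ++ [List.lookup attr d]) acc)) := by
  intro data
  induction data with
  | nil => intro acc; simp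
  | cons d rest ih =>
    intro acc
    simp only [List.foldl_cons]
    have hstep :
        (let v := List.lookup attr d
         let out1 :=
           match v with
           | some s => if s ∈ fz1 then (if ¬ s ∈ (pvFilt fz1 acc, pvFilt fz2 acc).1 then ((pvFilt fz1 acc, pvFilt fz2 acc).1 ++ [s], (pvFilt fz1 acc, pvFilt fz2 acc).2) else (pvFilt fz1 acc, pvFilt fz2 acc)) else (pvFilt fz1 acc, pvFilt fz2 acc)
           | none => (pvFilt fz1 acc, pvFilt fz2 acc)
         match v with
         | some s => if s ∈ fz2 then (if ¬ s ∈ out1.2 then (out1.1, out1.2 ++ [s]) else out1) else out1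
         | none => out1)
        = (pvFilt fz1 (if List.lookup attr d ∈ acc then acc else acc ++ [List.lookup attr d]),
           pvFilt fz2 (if List.lookup attr d ∈ acc then acc else acc ++ [List.lookup attr d])) := by
      cases hv : List.lookup attr d with
      | none =>
        by_cases hmem : (none : Option String) ∈ acc
        · simp [hmem]
        · simp [hmem, pvFilt]
      | some s =>
        by_cases hmem : (some s) ∈ acc
        · have h1 : s ∈ pvFilt fz1 acc ↔ s ∈ fz1 := by simp [mem_pvFilt, hmem]
          have h2 : s ∈ pvFilt fz2 acc ↔ s ∈ fz2 := by simp [mem_pvFilt, hmem]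
          by_cases hf1 : s ∈ fz1 <;> by_cases hf2 : s ∈ fz2 <;>
            simp [hmem, hf1, hf2, h1.mpr, h2]
        · have h1 : ¬ s ∈ pvFilt fz1 acc := by simp [mem_pvFilt, hmem]
          have h2 : ¬ s ∈ pvFilt fz2 acc := by simp [mem_pvFilt, hmem]
          have e1 : pvFilt fz1 (acc ++ [some s]) = pvFilt fz1 acc ++ (if s ∈ fz1 then [s] else []) := by
            rw [pvFilt_append]; by_cases hf : s ∈ fz1 <;> simp [pvFilt, hf]
          have e2 : pvFilt fz2 (acc ++ [some s]) = pvFilt fz2 acc ++ (if s ∈ fz2 then [s] else []) := by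
            rw [pvFilt_append]; by_cases hf : s ∈ fz2 <;> simp [pvFilt, hf]
          by_cases hf1 : s ∈ fz1 <;> by_cases hf2 : s ∈ fz2 <;>
            simp [hmem, hf1, hf2, h1, h2, e1, e2]
    rw [hstep, ih]

-- B's dedup equals the dedup-by-fold scan used in the invariant.
theorem pv_dedup_foldl (attr : String) (data : List (List (String × String))) :
    PySem.List.dedup (data.map (fun d => List.lookup attr d))
      = data.foldl (fun acc d => if List.lookup attr d ∈ acc then acc else acc ++ [List.lookup attr d]) [] := by
  have hadd : ∀ (acc : List (Option String)) (v : Option String),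
      PySem.Set.add acc v = if v ∈ acc then acc else acc ++ [v] := by
    intro acc v
    simp [PySem.Set.add]
  simp only [PySem.List.dedup, PySem.Set.ofList, List.foldl_map, hadd]
  rfl

-- ===== VERDICT (by name: the statement is the Claim_ definition above) =====
theorem triage_ids_spec : Claim_equal_triage_ids := by
  intro data attr fz1 fz2 _
  unfold Spec_triage_ids triage_ids triage_ids_alt
  have h := pv_loop attr fz1 fz2 data []
  simp only [pvFilt, List.filterMap_nil] at h
  rw [pv_dedup_foldl]
  rw [h]
  simp [pvFilt]
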